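-- pv_equiv track=rewrite | github.com/Dami-K1/Zadanka_APOK | Python/Operacje_String.py | zmien_znaki_4
-- ===== SOURCE A (Python) =====
-- def zmien_znaki_4(znaki):
--     znaki_w = ""
--     poprzedni_znak = " "
--     for ch in znaki:
--         if poprzedni_znak == " ":
--             ch = ch.upper()
--         znaki_w = znaki_w + ch
--         poprzedni_znak = ch
--     return znaki_w
-- ===== SOURCE B (Python) =====
-- def zmien_znaki_4(znaki):
--     return ' '.join(t[:1].upper() + t[1:] for t in znaki.split(' '))
-- ===== Notes on version B (the rewrite author's own statement) =====
-- stated objective: faster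
-- what changed: Replaces the stateful char-by-char loop (tracking the previous character and rebuilding the result by repeated string concatenation) with a single split-on-space / capitalize-each-token / join pass.
import Mathlib
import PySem

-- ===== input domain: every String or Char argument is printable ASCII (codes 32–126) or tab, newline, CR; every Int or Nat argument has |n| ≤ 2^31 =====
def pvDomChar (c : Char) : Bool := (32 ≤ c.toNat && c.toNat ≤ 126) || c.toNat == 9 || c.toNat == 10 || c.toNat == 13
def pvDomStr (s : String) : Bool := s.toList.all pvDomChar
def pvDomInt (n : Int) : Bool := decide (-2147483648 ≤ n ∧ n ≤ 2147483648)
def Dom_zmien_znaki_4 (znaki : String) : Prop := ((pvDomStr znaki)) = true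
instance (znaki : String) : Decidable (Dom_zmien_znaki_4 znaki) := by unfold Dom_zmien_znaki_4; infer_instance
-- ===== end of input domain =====

-- B replaces A's stateful previous-character loop by the idiomatic split(' ') / capitalize-token / join(' ') pass.

-- ===== PORT A =====
-- ch is a 1-character string in the Python loop; ch.upper() is PySem.Chars.upper on that
-- 1-character string (exact on the ASCII domain).
def zmien_znaki_4 (znaki : String) : String :=
  let r := znaki.toList.foldl
    (fun (st : List Char × List Char) c =>
      let ch := if st.2 == [' '] then PySem.Chars.upper [c] else [c]
      (st.1 ++ ch, ch))
    ([], [' '])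
  String.mk r.1

-- ===== PORT B =====
-- t[:1].upper() + t[1:]
def pvCapTok (t : List Char) : List Char :=
  PySem.Chars.upper (PySem.Chars.slice t none (some 1)) ++ PySem.Chars.slice t (some 1) none

-- ' '.join(pvCapTok(t) for t in znaki.split(' '))
def zmien_znaki_4_alt (znaki : String) : String :=
  String.mk (PySem.Chars.join [' '] ((PySem.Chars.splitOn znaki.toList [' ']).map pvCapTok))

-- ===== PRECONDITION & SPEC =====
def Spec_zmien_znaki_4 (znaki : String) (out : String) : Prop := out = zmien_znaki_4_alt znaki
instance (znaki : String) (out : String) : Decidable (Spec_zmien_znaki_4 znaki out) := by unfold Spec_zmien_znaki_4; infer_instance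

-- ===== CLAIM (what is proved, stated in full; the proofs are below) =====
def Claim_equal_zmien_znaki_4 : Prop := ∀ (znaki : String), Dom_zmien_znaki_4 znaki → Spec_zmien_znaki_4 znaki (zmien_znaki_4 znaki)

-- ===== LEMMAS AND PROOFS =====

-- Python's single-char upper never produces a space from a non-space.
theorem pvUpperChar_eq_space_iff (c : Char) : PySem.Chars.upperChar c = ' ' ↔ c = ' ' := by
  unfold PySem.Chars.upperChar PySem.Chars.islower
  split
  · rename_i hl
    simp only [Bool.and_eq_true, decide_eq_true_eq] at hl
    have h1 : 97 ≤ c.toNat := hl.1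
    have h2 : c.toNat ≤ 122 := hl.2
    have hv : (c.toNat - 32).isValidChar := by left; omega
    constructor
    · intro h
      exfalso
      have hn := congrArg Char.toNat h
      rw [Char.toNat_ofNat] at hn
      rw [if_pos hv] at hn
      have h32 : (' ' : Char).toNat = 32 := rfl
      rw [h32] at hn
      omega
    · intro h
      subst h
      exact absurd h1 (by decide)
  · simp

-- A's loop, with the state reduced to "was the previous written character a space?".
def pvOutA : Bool → List Char → List Char
  | _, [] => []
  | true, c :: cs => PySem.Chars.upperChar c :: pvOutA (PySem.Chars.upperChar c == ' ') cs
  | false, c :: cs => c :: pvOutA (c == ' ') cs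

theorem pvFoldl_eq_outA (cs : List Char) : ∀ (acc : List Char) (p : Char),
    (cs.foldl
      (fun (st : List Char × List Char) c =>
        let ch := if st.2 == [' '] then PySem.Chars.upper [c] else [c]
        (st.1 ++ ch, ch))
      (acc, [p])).1 = acc ++ pvOutA (p == ' ') cs := by
  induction cs with
  | nil => intro acc p; simp [pvOutA]
  | cons c cs ih =>
    intro acc p
    by_cases hp : p = ' '
    · subst hp
      simp only [List.foldl_cons]
      have : PySem.Chars.upper [c] = [PySem.Chars.upperChar c] := by simp [PySem.Chars.upper]
      simp only [show ([' '] == [' ']) = true from rfl, if_true, this]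
      rw [ih (acc ++ [PySem.Chars.upperChar c]) (PySem.Chars.upperChar c)]
      simp [pvOutA]
    · simp only [List.foldl_cons]
      have hne : ([p] == [' ']) = false := by simp [hp]
      simp only [hne, Bool.false_eq_true, if_false]
      rw [ih (acc ++ [c]) c]
      have hpb : (p == ' ') = false := by simp [hp]
      simp [pvOutA, hpb]

-- PySem's split on a single-character separator is Mathlib's List.splitOn.
theorem pvGo_single (c : Char) : ∀ (fuel : Nat) (l cur : List Char) (acc : List (List Char)), l.length < fuel →
    PySem.Chars.splitOn.go [c] fuel l cur acc
      = acc.reverse ++ (l.splitOn c).modifyHead (cur.reverse ++ ·) := by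
  intro fuel
  induction fuel with
  | zero => intro l cur acc h; omega
  | succ f ih =>
    intro l cur acc h
    cases l with
    | nil =>
      simp [PySem.Chars.splitOn.go, List.splitOn_nil]
    | cons c' rest =>
      obtain ⟨hh, tt, hsp⟩ : ∃ hh tt, rest.splitOn c = hh :: tt := by
        cases e : rest.splitOn c with
        | nil => exact absurd e (by simp [List.splitOn]; exact List.splitOnP_ne_nil _ _)
        | cons a b => exact ⟨a, b, rfl⟩
      by_cases hc : c' = c
      · subst hc
        have hpre : ([c'].isPrefixOf (c' :: rest)) = true := by simp [List.isPrefixOf]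
        rw [show PySem.Chars.splitOn.go [c'] (f + 1) (c' :: rest) cur acc
              = PySem.Chars.splitOn.go [c'] f ((c' :: rest).drop [c'].length) [] (cur.reverse :: acc) by
          conv_lhs => rw [PySem.Chars.splitOn.go]
          simp [hpre]]
        simp only [List.length_cons, List.length_nil, List.drop_succ_cons, List.drop_zero]
        rw [ih rest [] (cur.reverse :: acc) (by simp only [List.length_cons] at h; omega)]
        have hsc : (c' :: rest).splitOn c' = [] :: rest.splitOn c' := by
          simp [List.splitOn, List.splitOnP_cons]
        rw [hsc, hsp]
        simp
      · have hpre : ([c].isPrefixOf (c' :: rest)) = false := by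
          simp [List.isPrefixOf, hc]
          intro h'; exact absurd h'.symm hc
        rw [show PySem.Chars.splitOn.go [c] (f + 1) (c' :: rest) cur acc
              = PySem.Chars.splitOn.go [c] f rest (c' :: cur) acc by
          conv_lhs => rw [PySem.Chars.splitOn.go]
          simp [hpre]]
        rw [ih rest (c' :: cur) acc (by simp only [List.length_cons] at h; omega)]
        have hsc : (c' :: rest).splitOn c = (rest.splitOn c).modifyHead (c' :: ·) := by
          simp [List.splitOn, List.splitOnP_cons, hc]
        rw [hsc, hsp]
        simp

theorem pvSplitOn_single (s : List Char) (c : Char) :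
    PySem.Chars.splitOn s [c] = s.splitOn c := by
  unfold PySem.Chars.splitOn
  rw [pvGo_single c (s.length + 1) s [] [] (by omega)]
  cases e : s.splitOn c with
  | nil => exact absurd e (by simp [List.splitOn]; exact List.splitOnP_ne_nil _ _)
  | cons a b => simp

theorem pvCapTok_nil : pvCapTok [] = [] := by
  simp [pvCapTok, PySem.List.slice, PySem.Chars.upper]

theorem pvCapTok_cons (c : Char) (h : List Char) :
    pvCapTok (c :: h) = PySem.Chars.upperChar c :: h := by
  simp [pvCapTok, PySem.List.slice, PySem.Chars.upper]

theorem pvIntercalate_cons_head (x : Char) (h : List Char) (l : List (List Char)) :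
    [' '].intercalate ((x :: h) :: l) = x :: [' '].intercalate (h :: l) := by
  cases l <;> simp [List.intercalate, List.intersperse]

theorem pvIntercalate_nil_cons (y : List Char) (l : List (List Char)) :
    [' '].intercalate ([] :: y :: l) = ' ' :: [' '].intercalate (y :: l) := by
  simp [List.intercalate, List.intersperse]

theorem pvMain (cs : List Char) :
    (pvOutA true cs = [' '].intercalate ((cs.splitOn ' ').map pvCapTok)) ∧
    (∀ h t, cs.splitOn ' ' = h :: t →
      pvOutA false cs = [' '].intercalate (h :: t.map pvCapTok)) := by
  induction cs with
  | nil =>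
    constructor
    · simp [pvOutA, List.splitOn_nil, pvCapTok_nil, List.intercalate]
    · intro h t he
      rw [List.splitOn_nil] at he
      cases he
      simp [pvOutA, List.intercalate]
  | cons c cs ih =>
    obtain ⟨hh, tt, hsp⟩ : ∃ hh tt, cs.splitOn ' ' = hh :: tt := by
      cases e : cs.splitOn ' ' with
      | nil => exact absurd e (by simp [List.splitOn]; exact List.splitOnP_ne_nil _ _)
      | cons a b => exact ⟨a, b, rfl⟩
    by_cases hc : c = ' '
    · subst hc
      have hsc : ((' ' :: cs).splitOn ' ') = [] :: cs.splitOn ' ' := by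
        simp [List.splitOn, List.splitOnP_cons]
      have hupper : PySem.Chars.upperChar ' ' = ' ' := rfl
      constructor
      · show PySem.Chars.upperChar ' ' :: pvOutA (PySem.Chars.upperChar ' ' == ' ') cs = _
        rw [hupper, hsc, hsp]
        simp only [List.map_cons, pvCapTok_nil]
        rw [pvIntercalate_nil_cons]
        rw [← List.map_cons, ← hsp, ← ih.1]
        simp
      · intro h t he
        rw [hsc, hsp] at he
        injection he with he1 he2
        subst he1; subst he2
        show (' ' :: pvOutA ((' ' == ' ')) cs) = _
        simp only [List.map_cons]
        rw [pvIntercalate_nil_cons]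
        rw [← List.map_cons, ← hsp, ← ih.1]
        simp
    · have hsc : ((c :: cs).splitOn ' ') = (c :: hh) :: tt := by
        simp [List.splitOn, List.splitOnP_cons, hc]
        rw [show cs.splitOnP (fun a => a == ' ') = cs.splitOn ' ' from rfl, hsp]
        simp
      have hub : (PySem.Chars.upperChar c == ' ') = false := by
        simp [pvUpperChar_eq_space_iff, hc]
      have hcb : (c == ' ') = false := by simp [hc]
      constructor
      · show PySem.Chars.upperChar c :: pvOutA (PySem.Chars.upperChar c == ' ') cs = _
        rw [hub, hsc]
        simp only [List.map_cons, pvCapTok_cons]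
        rw [pvIntercalate_cons_head]
        rw [ih.2 hh tt hsp]
      · intro h t he
        rw [hsc] at he
        injection he with he1 he2
        subst he1; subst he2
        show c :: pvOutA ((c == ' ')) cs = _
        rw [hcb]
        rw [pvIntercalate_cons_head]
        rw [ih.2 hh tt hsp]

-- ===== VERDICT (by name: the statement is the Claim_ definition above) =====
theorem zmien_znaki_4_spec : Claim_equal_zmien_znaki_4 := by
  intro znaki _
  unfold Spec_zmien_znaki_4 zmien_znaki_4 zmien_znaki_4_alt
  dsimp only
  rw [pvFoldl_eq_outA znaki.toList [] ' ']
  have : (' ' == ' ') = true := rfl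
  rw [this]
  rw [pvSplitOn_single znaki.toList ' ']
  rw [(pvMain znaki.toList).1]
  simp [PySem.Chars.join]
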